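-- pv_equiv track=rewrite | github.com/elaris6/PythonPildoras | Cadenas_Colecciones/nombres_alumnos.py | busca_reps_listas2
-- ===== SOURCE A (Python) =====
-- def busca_reps_listas2(lista1,lista2,reps):
--     lista_total = lista1 + lista2
--     lista_no_reps=[]
--     lista_reps=[]
--     for elemento in lista_total:
--         if lista_total.count(elemento)>1 and (elemento not in lista_reps):
--             lista_reps.append(elemento)
--         else:
--             lista_no_reps.append(elemento)
--     if reps==0:
--         return lista_no_reps
--     else:
--         return lista_reps
-- ===== SOURCE B (Python) =====
-- def busca_reps_listas2(lista1, lista2, reps):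
--     total = lista1 + lista2
--     counts = {}
--     for v in total:
--         counts[v] = counts.get(v, 0) + 1
--     if reps != 0:
--         return [v for v in counts if counts[v] > 1]
--     result = list(total)
--     for v in counts:
--         if counts[v] > 1:
--             result.remove(v)
--     return result
-- ===== Notes on version B (the rewrite author's own statement) =====
-- stated objective: faster
-- what changed: A re-counts each element with a full-list scan while splitting occurrences into two growing lists; B builds a count table in one pass, reads the repeated keys straight off the table in first-appearance order, and for the no-repeats case deletes exactly the first occurrence of each repeated key from a copy of the list.
import Mathlib
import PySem

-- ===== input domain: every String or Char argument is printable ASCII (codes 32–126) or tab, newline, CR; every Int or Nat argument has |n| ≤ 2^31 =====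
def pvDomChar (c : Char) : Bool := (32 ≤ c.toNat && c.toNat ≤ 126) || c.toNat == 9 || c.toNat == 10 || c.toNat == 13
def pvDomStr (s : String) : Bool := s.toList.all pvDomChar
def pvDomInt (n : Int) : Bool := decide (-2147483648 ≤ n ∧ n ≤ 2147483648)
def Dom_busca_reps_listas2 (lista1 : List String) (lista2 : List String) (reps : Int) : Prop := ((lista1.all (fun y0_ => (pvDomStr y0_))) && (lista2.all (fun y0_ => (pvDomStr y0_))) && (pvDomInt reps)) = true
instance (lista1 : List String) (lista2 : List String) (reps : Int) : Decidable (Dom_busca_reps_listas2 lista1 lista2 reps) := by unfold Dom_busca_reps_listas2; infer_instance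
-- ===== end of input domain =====

-- B replaces A's per-element full-list count scan by a counting table built once:
-- distinct repeated keys are read off the table, and the no-repeats list is built by
-- first-occurrence removal; same return value, measured faster (objective: faster).

-- ===== PORT A =====
def busca_reps_listas2 (lista1 : List String) (lista2 : List String) (reps : Int) : List String :=
  let lista_total := lista1 ++ lista2
  let st := lista_total.foldl
    (fun st elemento =>
      if 1 < PySem.List.count lista_total elemento ∧ elemento ∉ st.2
      then (st.1, st.2 ++ [elemento])
      else (st.1 ++ [elemento], st.2))
    (([] : List String), ([] : List String))
  if reps = 0 then st.1 else st.2

-- ===== PORT B =====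
def busca_reps_listas2_alt (lista1 : List String) (lista2 : List String) (reps : Int) : List String :=
  let total := lista1 ++ lista2
  let counts := total.foldl (fun d v => d.insert v (d.getD v 0 + 1)) (PySem.Dict.empty : PySem.Dict String Int)
  if reps ≠ 0 then
    counts.keys.filter (fun v => decide (1 < counts.getD v 0))
  else
    -- result.remove(v) can never raise here (v counted > 1 and removed once); '.getD result' is its totalized form
    counts.keys.foldl
      (fun result v => if 1 < counts.getD v 0 then (PySem.List.remove? result v).getD result else result)
      total

-- ===== PRECONDITION & SPEC =====
def Spec_busca_reps_listas2 (lista1 : List String) (lista2 : List String) (reps : Int) (out : List String) : Prop := out = busca_reps_listas2_alt lista1 lista2 reps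
instance (lista1 : List String) (lista2 : List String) (reps : Int) (out : List String) : Decidable (Spec_busca_reps_listas2 lista1 lista2 reps out) := by unfold Spec_busca_reps_listas2; infer_instance

-- ===== CLAIM (what is proved, stated in full; the proofs are below) =====
def Claim_equal_busca_reps_listas2 : Prop := ∀ (lista1 : List String) (lista2 : List String) (reps : Int), Dom_busca_reps_listas2 lista1 lista2 reps → Spec_busca_reps_listas2 lista1 lista2 reps (busca_reps_listas2 lista1 lista2 reps)

-- ===== LEMMAS AND PROOFS =====

-- erasing any list of values from [] yields []
theorem pv_foldl_erase_nil (vs : List String) :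
    vs.foldl (fun r v => r.erase v) ([] : List String) = [] := by
  induction vs with
  | nil => rfl
  | cons v vs ih => simpa using ih

-- pushing one cons through a sequence of first-occurrence erasures
theorem pv_foldl_erase_cons (vs : List String) (x : String) (l : List String) :
    vs.foldl (fun r v => r.erase v) (x :: l)
      = if x ∈ vs then (vs.erase x).foldl (fun r v => r.erase v) l
        else x :: vs.foldl (fun r v => r.erase v) l := by
  induction vs generalizing l with
  | nil => simp
  | cons v vs ih =>
    by_cases hvx : v = x
    · subst hvx
      simp [List.foldl_cons, List.erase_cons_head]
    · have hbe : (x == v) = false := beq_eq_false_iff_ne.mpr (Ne.symm hvx)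
      have hbe' : (v == x) = false := beq_eq_false_iff_ne.mpr hvx
      rw [List.foldl_cons, List.erase_cons_tail (by simp [Ne.symm hvx]), ih,
        List.erase_cons_tail (by simp [hvx])]
      by_cases hx : x ∈ vs
      · rw [if_pos hx, if_pos (by simp [hx]), List.foldl_cons]
      · rw [if_neg hx, if_neg (by simp [hx, Ne.symm hvx]), List.foldl_cons]

-- the no-repeats component of A's loop equals erasing the pending repeated keys
theorem pv_fst_loop (p : String → Prop) [DecidablePred p] :
    ∀ (l vs nr r : List String), vs.Nodup →
      (∀ x ∈ l, (x ∈ vs ↔ (p x ∧ x ∉ r))) →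
      (l.foldl
        (fun st x => if p x ∧ x ∉ st.2 then (st.1, st.2 ++ [x]) else (st.1 ++ [x], st.2))
        (nr, r)).1
        = nr ++ vs.foldl (fun res v => res.erase v) l := by
  intro l
  induction l with
  | nil => intro vs nr r _ _; simp [pv_foldl_erase_nil]
  | cons x l ih =>
    intro vs nr r hnd hinv
    rw [pv_foldl_erase_cons]
    by_cases h : p x ∧ x ∉ r
    · have hx : x ∈ vs := (hinv x (by simp)).mpr h
      rw [List.foldl_cons, if_pos h, if_pos hx]
      refine ih (vs.erase x) nr (r ++ [x]) (hnd.erase x) ?_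
      intro y hy
      rw [hnd.mem_erase_iff]
      by_cases hyx : y = x
      · subst hyx; simp
      · rw [hinv y (by simp [hy])]
        simp [hyx]
    · have hx : x ∉ vs := fun hmem => h ((hinv x (by simp)).mp hmem)
      rw [List.foldl_cons, if_neg h, if_neg hx,
        ih vs (nr ++ [x]) r hnd (fun y hy => hinv y (by simp [hy]))]
      simp

-- the repeats component of A's loop is a Set.add fold over the repeated occurrences
theorem pv_snd_loop (p : String → Prop) [DecidablePred p] :
    ∀ (l nr r : List String),
      (l.foldl
        (fun st x => if p x ∧ x ∉ st.2 then (st.1, st.2 ++ [x]) else (st.1 ++ [x], st.2))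
        (nr, r)).2
        = (l.filter (fun x => decide (p x))).foldl PySem.Set.add r := by
  intro l
  induction l with
  | nil => intro nr r; rfl
  | cons x l ih =>
    intro nr r
    by_cases hp : p x
    · have hf : List.filter (fun y => decide (p y)) (x :: l)
          = x :: List.filter (fun y => decide (p y)) l := by simp [hp]
      rw [hf, List.foldl_cons, List.foldl_cons]
      by_cases hr : x ∈ r
      · rw [if_neg (by tauto), ih, show PySem.Set.add r x = r by simp [PySem.Set.add, hr]]
      · rw [if_pos ⟨hp, hr⟩, ih,
          show PySem.Set.add r x = r ++ [x] by simp [PySem.Set.add, hr]]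
    · have hf : List.filter (fun y => decide (p y)) (x :: l)
          = List.filter (fun y => decide (p y)) l := by simp [hp]
      rw [hf, List.foldl_cons, if_neg (by tauto), ih]

-- Set.add commutes with filtering by a fixed predicate
theorem pv_foldl_add_filter (q : String → Bool) :
    ∀ (l s : List String),
      ((l.filter q).foldl PySem.Set.add (s.filter q)) = (l.foldl PySem.Set.add s).filter q := by
  intro l
  induction l with
  | nil => intro s; rfl
  | cons x l ih =>
    intro s
    have hadd : (PySem.Set.add s x).filter q
        = if q x then PySem.Set.add (s.filter q) x else s.filter q := by
      by_cases hs : x ∈ s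
      · by_cases hq : q x
        · simp [PySem.Set.add, hs, List.mem_filter, hq]
        · simp [PySem.Set.add, hs, hq]
      · by_cases hq : q x
        · simp [PySem.Set.add, hs, hq, List.filter_append, List.mem_filter]
        · simp [PySem.Set.add, hs, hq, List.filter_append]
    by_cases hq : q x
    · simp only [List.filter_cons, hq, List.foldl_cons]
      rw [← ih (PySem.Set.add s x), hadd]
      simp [hq]
    · simp only [List.filter_cons, hq, List.foldl_cons]
      rw [← ih (PySem.Set.add s x), hadd]
      simp [hq]

theorem pv_ofList_filter (q : String → Bool) (l : List String) :
    (l.filter q).foldl PySem.Set.add ([] : List String)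
      = (PySem.Set.ofList l).filter q := by
  have := pv_foldl_add_filter q l []
  simpa [PySem.Set.ofList, PySem.Set.empty] using this

-- remove-first totalized with getD is List.erase
theorem pv_removeD_eq_erase (xs : List String) (v : String) :
    (PySem.List.remove? xs v).getD xs = xs.erase v := by
  by_cases h : v ∈ xs
  · rw [PySem.List.remove?_eq_some_erase xs v h]; rfl
  · rw [(PySem.List.remove?_eq_none_iff xs v).mpr h, Option.getD_none,
      List.erase_of_not_mem h]

-- ===== VERDICT (by name: the statement is the Claim_ definition above) =====
theorem busca_reps_listas2_spec : Claim_equal_busca_reps_listas2 := by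
  intro lista1 lista2 reps _
  unfold Spec_busca_reps_listas2 busca_reps_listas2 busca_reps_listas2_alt
  simp only [PySem.Dict.foldl_insert_getD_add_one_eq_counter, PySem.Dict.keys_counter,
    PySem.Dict.getD_counter]
  set t := lista1 ++ lista2 with ht
  by_cases hz : reps = 0
  · simp only [hz, ite_not, if_true]
    -- no-repeats branch
    simp only [pv_removeD_eq_erase]
    have hcast : ∀ v : String, ((1 : Int) < (List.count v t : Int)) ↔ 1 < List.count v t := by
      intro v; exact_mod_cast Iff.rfl
    rw [show (fun (result : List String) (v : String) =>
          if (1:Int) < (List.count v t : Int) then result.erase v else result)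
        = (fun result v => if (1 < List.count v t : Prop) then result.erase v else result) by
      funext result v; simp [hcast v]]
    rw [show ((PySem.Set.ofList t).foldl
          (fun result v => if (1 < List.count v t : Prop) then result.erase v else result) t)
        = (((PySem.Set.ofList t).filter (fun v => decide (1 < List.count v t))).foldl
            (fun r v => r.erase v) t) by
      rw [List.foldl_filter]; simp]
    rw [pv_fst_loop (fun x => 1 < PySem.List.count t x) t
      ((PySem.Set.ofList t).filter (fun v => decide (1 < List.count v t))) [] []
      ((PySem.Set.nodup_ofList t).filter _)
      (by intro x hx
          simp [List.mem_filter, PySem.Set.mem_ofList, PySem.List.count_eq, hx])]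
    simp
  · simp only [if_neg hz, if_pos hz]
    rw [pv_snd_loop (fun x => 1 < PySem.List.count t x) t [] []]
    rw [pv_ofList_filter]
    apply List.filter_congr
    intro v _
    simp only [decide_eq_decide, PySem.List.count_eq]
    exact_mod_cast Iff.rfl
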